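-- pv_equiv track=rewrite | github.com/zhaiyi000/x-evolve | test_admissible_set_ori.py | expand_admissible_set
-- ===== SOURCE A (Python) =====
-- import itertools
-- import itertools
--
-- TRIPLES = [(0, 0, 0), (0, 0, 1), (0, 0, 2), (0, 1, 2), (0, 2, 1), (1, 1, 1), (2, 2, 2)]
--
-- def expand_admissible_set(
--     pre_admissible_set: list[tuple[int, ...]],
-- ) -> list[tuple[int, ...]]:
--     """Expands a pre-admissible set into an admissible set."""
--     num_groups = len(pre_admissible_set[0])
--     admissible_set = []
--     for row in pre_admissible_set:
--         rotations = [[] for _ in range(num_groups)]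
--         for i in range(num_groups):
--             x, y, z = TRIPLES[row[i]]
--             rotations[i].append((x, y, z))
--             if not x == y == z:
--                 rotations[i].append((z, x, y))
--                 rotations[i].append((y, z, x))
--         product = list(itertools.product(*rotations))
--         concatenated = [sum(xs, ()) for xs in product]
--         admissible_set.extend(concatenated)
--     return admissible_set
-- ===== SOURCE B (Python) =====
-- TRIPLES = [(0, 0, 0), (0, 0, 1), (0, 0, 2), (0, 1, 2), (0, 2, 1), (1, 1, 1), (2, 2, 2)]
--
-- def expand_admissible_set(
--     pre_admissible_set: list[tuple[int, ...]],
-- ) -> list[tuple[int, ...]]: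
--     """Expands a pre-admissible set into an admissible set (mixed-radix enumeration)."""
--     num_groups = len(pre_admissible_set[0])
--     admissible_set = []
--     for row in pre_admissible_set:
--         total = 1
--         for i in range(num_groups):
--             x, y, z = TRIPLES[row[i]]
--             if not x == y == z:
--                 total *= 3
--         for n in range(total):
--             m = n
--             tup = ()
--             for i in reversed(range(num_groups)):
--                 x, y, z = TRIPLES[row[i]]
--                 if x == y == z:
--                     tup = (x, y, z) + tup
--                 else:
--                     m, d = divmod(m, 3)
--                     tup = ((x, y, z), (z, x, y), (y, z, x))[d] + tup
--             admissible_set.append(tup)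
--     return admissible_set
-- ===== Notes on version B (the rewrite author's own statement) =====
-- stated objective: alternative
-- what changed: Replaced the rotations table + itertools.product + sum-flattening with a mixed-radix counter: B counts the expansions of each row and, for each index n, decodes n's base-3 digits right-to-left into one output tuple directly, never materializing rotation lists or a product of tuples.
import Mathlib
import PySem

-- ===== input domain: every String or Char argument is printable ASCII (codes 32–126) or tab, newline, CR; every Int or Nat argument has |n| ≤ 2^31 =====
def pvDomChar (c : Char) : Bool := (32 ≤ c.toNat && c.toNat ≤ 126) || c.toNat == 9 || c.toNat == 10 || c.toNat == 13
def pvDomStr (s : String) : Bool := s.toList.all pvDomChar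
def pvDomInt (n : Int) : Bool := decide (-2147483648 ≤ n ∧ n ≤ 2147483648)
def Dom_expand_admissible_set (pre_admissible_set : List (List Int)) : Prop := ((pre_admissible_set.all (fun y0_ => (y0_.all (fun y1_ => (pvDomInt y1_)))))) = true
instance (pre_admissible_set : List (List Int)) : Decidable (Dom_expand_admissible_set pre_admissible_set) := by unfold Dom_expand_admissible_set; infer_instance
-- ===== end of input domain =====

-- B replaces A's rotations table + itertools.product + sum-flattening by a mixed-radix counter:
-- it computes the number of expansions of a row and, for each index n, decodes n's base-3 digits
-- right-to-left into one output tuple directly (objective: alternative; same output, same order).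

-- ===== PORT A =====
def pvTriples : List (Int × Int × Int) :=
  [(0,0,0),(0,0,1),(0,0,2),(0,1,2),(0,2,1),(1,1,1),(2,2,2)]

-- rotations[i] of A, for TRIPLES[row[i]] (the pyGet? default is never hit inside Pre_)
def pvRotA (v : Int) : List (List Int) :=
  let t := (PySem.List.pyGet? pvTriples v).getD (0,0,0)
  let x := t.1; let y := t.2.1; let z := t.2.2
  if x = y ∧ y = z then [[x,y,z]] else [[x,y,z],[z,x,y],[y,z,x]]

-- itertools.product(*ls) in product order (leftmost factor varies slowest)
def pvProd (ls : List (List (List Int))) : List (List (List Int)) :=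
  ls.foldr (fun l acc => l.flatMap (fun x => acc.map (x :: ·))) [[]]

def expand_admissible_set (pre_admissible_set : List (List Int)) : List (List Int) :=
  let numGroups := (pre_admissible_set.headD []).length
  pre_admissible_set.foldl (fun admissible_set row =>
    let rotations := (List.range numGroups).map
      (fun i : Nat => pvRotA ((PySem.List.pyGet? row (i : Int)).getD 0))
    let product := pvProd rotations
    let concatenated := product.map (fun xs => xs.foldl (· ++ ·) [])
    admissible_set ++ concatenated) []

-- ===== PORT B =====
-- one step of B's inner (right-to-left) decoding loop, on the group value g = row[i]
def pvStepB (g : Int) (st : Int × List Int) : Int × List Int :=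
  let t := (PySem.List.pyGet? pvTriples g).getD (0,0,0)
  let x := t.1; let y := t.2.1; let z := t.2.2
  if x = y ∧ y = z then (st.1, [x,y,z] ++ st.2)
  else
    let d := PySem.Int.mod st.1 3
    let m := PySem.Int.floordiv st.1 3
    (m, ((PySem.List.pyGet? [[x,y,z],[z,x,y],[y,z,x]] d).getD []) ++ st.2)

def expand_admissible_set_alt (pre_admissible_set : List (List Int)) : List (List Int) :=
  let numGroups := (pre_admissible_set.headD []).length
  pre_admissible_set.foldl (fun admissible_set row =>
    let total := (List.range numGroups).foldl (fun total (i : Nat) =>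
        let t := (PySem.List.pyGet? pvTriples ((PySem.List.pyGet? row (i : Int)).getD 0)).getD (0,0,0)
        if t.1 = t.2.1 ∧ t.2.1 = t.2.2 then total else total * 3) (1 : Int)
    (PySem.List.pyRange 0 total 1).foldl (fun adm n =>
      let st := ((List.range numGroups).reverse).foldl
        (fun st (i : Nat) => pvStepB ((PySem.List.pyGet? row (i : Int)).getD 0) st) (n, [])
      adm ++ [st.2]) admissible_set) []

-- ===== PRECONDITION & SPEC =====
-- Pre_ = exactly the inputs where Python A returns: nonempty input, every row at
-- least num_groups long, every accessed entry a valid (possibly negative) index into TRIPLES.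
def Pre_expand_admissible_set (pre_admissible_set : List (List Int)) : Prop :=
  pre_admissible_set ≠ [] ∧
  ∀ row ∈ pre_admissible_set,
    (pre_admissible_set.headD []).length ≤ row.length ∧
    ∀ v ∈ row.take (pre_admissible_set.headD []).length, -7 ≤ v ∧ v ≤ 6

instance (pre_admissible_set : List (List Int)) : Decidable (Pre_expand_admissible_set pre_admissible_set) := by
  unfold Pre_expand_admissible_set; infer_instance

def pvWitness_expand_admissible_set : List (List Int) := [[0, 3], [1, 6]]

def Spec_expand_admissible_set (pre_admissible_set : List (List Int)) (out : List (List Int)) : Prop := out = expand_admissible_set_alt pre_admissible_set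
instance (pre_admissible_set : List (List Int)) (out : List (List Int)) : Decidable (Spec_expand_admissible_set pre_admissible_set out) := by unfold Spec_expand_admissible_set; infer_instance

-- ===== CLAIM (what is proved, stated in full; the proofs are below) =====
def Claim_equal_expand_admissible_set : Prop := ∀ (pre_admissible_set : List (List Int)), Dom_expand_admissible_set pre_admissible_set → Pre_expand_admissible_set pre_admissible_set → Spec_expand_admissible_set pre_admissible_set (expand_admissible_set pre_admissible_set)

-- ===== LEMMAS AND PROOFS =====

-- total number of expansions of the group list gs (the mixed-radix modulus)
def pvT (gs : List Int) : Nat :=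
  gs.foldr (fun g acc => (pvRotA g).length * acc) 1

-- the mixed-radix decoding of index n for group list gs (leftmost digit most significant)
def pvDec (gs : List Int) (n : Nat) : List Int :=
  match gs with
  | [] => []
  | g :: gs => (pvRotA g).getD ((n / pvT gs) % (pvRotA g).length) [] ++ pvDec gs (n % pvT gs)

theorem pvRotA_length (g : Int) : (pvRotA g).length = 1 ∨ (pvRotA g).length = 3 := by
  unfold pvRotA
  dsimp only
  split_ifs <;> simp

theorem pvT_pos (gs : List Int) : 0 < pvT gs := by
  induction gs with
  | nil => simp [pvT]
  | cons g gs ih =>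
      have := pvRotA_length g
      simp only [pvT, List.foldr_cons] at *
      rcases this with h | h <;> rw [h] <;> omega

theorem foldl_append_flatten (xs : List (List Int)) (a : List Int) :
    xs.foldl (· ++ ·) a = a ++ xs.flatten := by
  induction xs generalizing a with
  | nil => simp
  | cons x xs ih => simp [List.foldl_cons, ih, List.append_assoc]

theorem map_getD_range (l : List (List Int)) :
    (List.range l.length).map (fun i => l.getD i []) = l := by
  apply List.ext_getElem <;> simp
  intro i h1 h2
  simp [List.getElem?_eq_getElem h1]

-- block decomposition of a range of a product
theorem range_mul_map (a b : Nat) (f : Nat → List Int) :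
    (List.range (a * b)).map f
      = (List.range a).flatMap (fun i => (List.range b).map (fun j => f (i * b + j))) := by
  induction a with
  | zero => simp
  | succ a ih =>
      have : (a + 1) * b = a * b + b := by ring
      rw [this, List.range_add, List.map_append, ih, List.range_succ, List.flatMap_append]
      simp [List.map_map, Function.comp_def]

-- L1 (on the flatten form): the product in A's order is the mixed-radix enumeration
theorem prod_eq_dec' (gs : List Int) :
    (pvProd (gs.map pvRotA)).map List.flatten
      = (List.range (pvT gs)).map (fun n => pvDec gs n) := by
  induction gs with
  | nil => simp [pvProd, pvT, pvDec]
  | cons g gs ih =>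
      have hb : 0 < pvT gs := pvT_pos gs
      have hprod : pvProd ((g :: gs).map pvRotA)
          = (pvRotA g).flatMap (fun x => (pvProd (gs.map pvRotA)).map (x :: ·)) := by
        simp [pvProd]
      have hT : pvT (g :: gs) = (pvRotA g).length * pvT gs := by simp [pvT]
      rw [hprod, hT, range_mul_map _ _ (fun n => pvDec (g :: gs) n)]
      rw [List.map_flatMap]
      simp only [List.map_map]
      have hx : ∀ x : List Int, (List.flatten ∘ fun xs => x :: xs)
          = (fun xs => x ++ List.flatten xs) := by
        intro x; funext xs; simp
      conv_lhs =>
        rw [← map_getD_range (pvRotA g), List.flatMap_map]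
      simp only [List.flatMap_def]
      congr 1
      apply List.map_congr_left
      intro i hi
      rw [hx]
      have hcomp : (fun xs : List (List Int) => (pvRotA g).getD i [] ++ xs.flatten)
          = (fun t => (pvRotA g).getD i [] ++ t) ∘ List.flatten := rfl
      rw [hcomp, ← List.map_map, ih, List.map_map]
      apply List.map_congr_left
      intro j hj
      simp only [List.mem_range] at hi hj
      simp only [Function.comp_apply, pvDec]
      have h1 : (i * pvT gs + j) / pvT gs = i := by
        rw [mul_comm, Nat.mul_add_div hb, Nat.div_eq_of_lt hj, Nat.add_zero]
      have h2 : (i * pvT gs + j) % pvT gs = j := by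
        rw [mul_comm, Nat.mul_add_mod, Nat.mod_eq_of_lt hj]
      rw [h1, h2, Nat.mod_eq_of_lt hi]

theorem prod_eq_dec (gs : List Int) :
    (pvProd (gs.map pvRotA)).map (fun xs => xs.foldl (· ++ ·) [])
      = (List.range (pvT gs)).map (fun n => pvDec gs n) := by
  rw [← prod_eq_dec' gs]
  apply List.map_congr_left
  intro xs _
  rw [foldl_append_flatten, List.nil_append]

-- L2: B's right-to-left divmod fold computes pvDec
theorem foldB_eq_dec (gs : List Int) (m : Nat) (tup : List Int) :
    gs.reverse.foldl (fun st g => pvStepB g st) ((m : Int), tup)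
      = (((m / pvT gs : Nat) : Int), pvDec gs (m % pvT gs) ++ tup) := by
  induction gs with
  | nil => simp [pvT, pvDec]
  | cons g gs ih =>
      have hb : 0 < pvT gs := pvT_pos gs
      rw [List.reverse_cons, List.foldl_append, ih]
      simp only [List.foldl_cons, List.foldl_nil]
      have hT : pvT (g :: gs) = (pvRotA g).length * pvT gs := by simp [pvT]
      rw [pvDec, hT]
      unfold pvStepB pvRotA
      dsimp only
      split_ifs with h
      · -- fixed triple: radix 1
        simp [Nat.mod_mod_of_dvd m dvd_rfl]
      · -- rotating triple: radix 3
        simp only [List.length_cons, List.length_nil]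
        have h3 : ((3:Nat) : Int) = (3 : Int) := by norm_num
        rw [← h3, PySem.Int.floordiv_natCast, PySem.Int.mod_natCast]
        have hdig : m % (3 * pvT gs) / pvT gs = m / pvT gs % 3 := by
          rw [mul_comm, Nat.mod_mul_right_div_self]
        have htail : m % (3 * pvT gs) % pvT gs = m % pvT gs :=
          Nat.mod_mod_of_dvd m ⟨3, by ring⟩
        rw [show (0:Nat) + 1 + 1 + 1 = 3 from rfl, Nat.div_div_eq_div_mul,
          mul_comm (pvT gs) 3, hdig, htail, Nat.mod_mod_of_dvd _ dvd_rfl,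
          PySem.List.pyGet?_natCast]
        simp [List.getD, List.append_assoc]

-- B's first inner loop computes pvT
theorem foldB_total (gs : List Int) (a : Int) :
    gs.foldl (fun total g =>
        let t := (PySem.List.pyGet? pvTriples g).getD (0,0,0)
        if t.1 = t.2.1 ∧ t.2.1 = t.2.2 then total else total * 3) a
      = a * ((pvT gs : Nat) : Int) := by
  induction gs generalizing a with
  | nil => simp [pvT]
  | cons g gs ih =>
      rw [List.foldl_cons, ih]
      have hT : pvT (g :: gs) = (pvRotA g).length * pvT gs := by simp [pvT]
      rw [hT]
      unfold pvRotA
      dsimp only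
      split_ifs with h
      · simp
      · simp only [List.length_cons, List.length_nil]
        push_cast
        ring

theorem expand_admissible_set_spec' (pre : List (List Int)) :
    expand_admissible_set pre = expand_admissible_set_alt pre := by
  unfold expand_admissible_set expand_admissible_set_alt
  apply PySem.List.foldl_congr_mem
  intro adm row _
  dsimp only
  set N := (pre.headD []).length with hN
  set f : Nat → Int := fun i => (PySem.List.pyGet? row (i : Int)).getD 0 with hf
  set gs : List Int := (List.range N).map f with hgs
  -- A side: rotations = gs.map pvRotA, then prod_eq_dec
  have hrots : (List.range N).map (fun i : Nat => pvRotA (f i)) = gs.map pvRotA := by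
    rw [hgs, List.map_map]; rfl
  rw [hrots, prod_eq_dec gs]
  -- B side: the total loop computes pvT gs
  have htot : (List.range N).foldl (fun total (i : Nat) =>
      let t := (PySem.List.pyGet? pvTriples (f i)).getD (0,0,0)
      if t.1 = t.2.1 ∧ t.2.1 = t.2.2 then total else total * 3) (1 : Int)
      = ((pvT gs : Nat) : Int) := by
    have h2 := foldB_total gs 1
    rw [one_mul] at h2
    rw [hgs, List.foldl_map] at h2
    exact h2
  rw [htot, PySem.List.pyRange_zero_nat,
    PySem.List.foldl_append_singleton_eq_map, List.map_map]
  congr 1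
  apply List.map_congr_left
  intro k hk
  simp only [List.mem_range] at hk
  -- B's decoding fold over the reversed index range is the fold over gs.reverse
  have hrev : (List.range N).reverse.foldl
      (fun st (i : Nat) => pvStepB (f i) st) (((k : Nat) : Int), ([] : List Int))
      = gs.reverse.foldl (fun st g => pvStepB g st) ((k : Int), []) := by
    rw [hgs, ← List.map_reverse, List.foldl_map]
  simp only [Function.comp_apply]
  rw [hrev, foldB_eq_dec gs k []]
  simp [Nat.mod_eq_of_lt hk]
-- ===== VERDICT (by name: the statement is the Claim_ definition above) =====
theorem expand_admissible_set_spec : Claim_equal_expand_admissible_set := by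
  intro pre _ _
  exact expand_admissible_set_spec' pre
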